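/- GENERATED by tools/from_farm_form.py from prooffarm-gif/accepted/DGifOpen.3/Proof.lean (a worked proof of the farm's unit `DGifOpen.3`,
   accepted by the verdict) — do not edit. -/
import Gif.Spec.Units.DGifOpen_3
import Gif.Spec.AllSegs
import Gif.Spec.Proved.DGifOpen_3_Lemmas

open X86 X86.User Asan ProgX.Base ProgX.Base.Spec Gif.Spec

/-!
  `DGifOpen.3` (0x10879e … 0x1087b9 and 0x10886d … 0x10889c, 19 instructions; dgif_lib.c:206-214): segment 3 of the protected
  function `DGifOpen`: `InternalRead(gif, Buf, 6)`; six bytes: on to 0x1087b9 with the same heap and forest; fewer: `*Error = 102`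
  if `Error` is not NULL, `free(pv)`, `free(gif)`, `ebx = 0`, to the epilogue (0x108816) with the heap `(Hc.release pv).release gif`.
  Four walks (Lemmas.lean) chained here; the private cuts are the return address of `InternalRead` (ret13), the join 0x108882 of the
  two arms of `if (Error != NULL)`, and the return address of the first `free` (ret22).
-/

/-- Segment 3 of `DGifOpen` takes `Opened` at 0x10879e to `Opened` at 0x1087b9 or to an exit to the epilogue. -/
theorem Gif.Spec.Proved.DGifOpen_3_ok : Gif.Spec.DGifOpen_3.Statement := by
  intro Lay hLay μ hμ u₀ hcode h_InternalRead h_free h_asan_store4_noabort H rest frames R Hc gif pv e ret v hat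
  -- the callees' contracts for the frame list of the body (the own frame in front): the request of 6 bytes; `free` at the heap
  -- `Hc` (pv, 24936 bytes) and at `Hc.release pv` (gif, 120 bytes)
  have hir := h_InternalRead Hc rest (DGifOpen.framesIn frames e) (DGifOpen.fresh gif pv) R 6
  have hfree1 := h_free Hc rest (DGifOpen.framesIn frames e) 24936
  have hfree2 := h_free (Hc.release pv) rest (DGifOpen.framesIn frames e) 120
  -- 0x10879e … the call of InternalRead … 0x1087b0 (dgif_lib.c:206)
  refine (Gif.Spec.DGifOpen_3.o3_seg_call Lay hLay μ hμ u₀ hcode H rest frames R Hc gif pv e ret hir v hat).trans ?_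
  intro v1 hv1
  -- 0x1087b0 … 0x1087b9 (six bytes read) | 0x108882 (short read; dgif_lib.c:208-209)
  refine (Gif.Spec.DGifOpen_3.o3_seg_branch Lay hLay μ hμ u₀ hcode H rest frames R Hc gif pv e ret h_asan_store4_noabort
    v1 hv1).trans ?_
  intro v2 hv2
  rcases hv2 with hgo | herr
  · -- 0x1087b9: the exit to segment 4
    exact ReachVia.done (Or.inl hgo)
  · -- 0x108882 … `free(pv)` … 0x10888a (dgif_lib.c:211)
    refine (Gif.Spec.DGifOpen_3.o3_seg_free1 Lay hLay μ hμ u₀ hcode H rest frames R Hc gif pv e ret hfree1 v2 herr).trans ?_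
    intro v3 hv3
    -- 0x10888a … `free(gif)` … 0x108816 (dgif_lib.c:212-213)
    refine (Gif.Spec.DGifOpen_3.o3_seg_free2 Lay hLay μ hμ u₀ hcode H rest frames R Hc gif pv e ret hfree2 v3 hv3).trans ?_
    intro v4 hv4
    exact ReachVia.done (Or.inr hv4)
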